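-- pv_equiv track=rewrite | github.com/upesacm/100DaysOfCode-2025 | DSA/PranyaGupta_500126032/Day33Question2.py | unsetBit
-- ===== SOURCE A (Python) =====
-- def unsetBit(n):
--     i=0
--     while n:
--         if (n&1<<i) !=0:
--             n=n^((1<<i))
--             return n
--         else:
--             i+=1
-- ===== SOURCE B (Python) =====
-- def unsetBit(n):
--     if n == 0:
--         return None
--     return n & (n - 1)
-- ===== Notes on version B (the rewrite author's own statement) =====
-- stated objective: idiomatic
-- what changed: Replaces the bit-position scanning loop with the closed-form bit trick n & (n-1), which clears the lowest set bit in one operation.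
import Mathlib
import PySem

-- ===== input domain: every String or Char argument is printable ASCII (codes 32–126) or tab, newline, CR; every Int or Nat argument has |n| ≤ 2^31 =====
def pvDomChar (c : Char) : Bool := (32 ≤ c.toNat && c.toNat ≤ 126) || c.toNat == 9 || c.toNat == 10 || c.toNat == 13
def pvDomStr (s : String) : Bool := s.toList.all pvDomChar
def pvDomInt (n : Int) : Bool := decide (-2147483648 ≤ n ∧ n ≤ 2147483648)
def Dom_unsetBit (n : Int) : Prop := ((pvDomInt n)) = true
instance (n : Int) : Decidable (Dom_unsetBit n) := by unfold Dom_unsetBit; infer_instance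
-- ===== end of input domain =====

-- B replaces A's bit-position scanning loop by the closed-form trick n & (n-1) (idiomatic; return value only).

-- ===== PORT A =====
-- the while loop, scanning bit positions i = 0, 1, …; fuel only makes the
-- recursion total (n.natAbs + 1 steps always suffice to reach the lowest set bit)
def unsetBitGo (n : Int) (i : Nat) (fuel : Nat) : Option Int :=
  match fuel with
  | 0 => none
  | Nat.succ fuel =>
    if n = 0 then none
    else if PySem.Int.band n (1 <<< i) ≠ 0 then some (PySem.Int.bxor n (1 <<< i))
    else unsetBitGo n (i + 1) fuel

def unsetBit (n : Int) : Option Int := unsetBitGo n 0 (n.natAbs + 1)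

-- ===== PORT B =====
def unsetBit_alt (n : Int) : Option Int :=
  if n = 0 then none else some (PySem.Int.band n (n - 1))

-- ===== PRECONDITION & SPEC =====
def Spec_unsetBit (n : Int) (out : Option Int) : Prop := out = unsetBit_alt n
instance (n : Int) (out : Option Int) : Decidable (Spec_unsetBit n out) := by unfold Spec_unsetBit; infer_instance

-- ===== CLAIM (what is proved, stated in full; the proofs are below) =====
def Claim_equal_unsetBit : Prop := ∀ (n : Int), Dom_unsetBit n → Spec_unsetBit n (unsetBit n)

-- ===== LEMMAS AND PROOFS =====

-- Nat: the common bits plus the set difference of bits reassemble the number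
theorem pv_and_add_ldiff (m : Nat) : ∀ n : Nat, (m &&& n) + Nat.ldiff m n = m := by
  induction m using Nat.binaryRec with
  | zero => intro n; simp [Nat.zero_and, Nat.ldiff]
  | bit a m ih =>
    intro n
    rw [← Nat.bit_decide_mod_two_eq_one_shiftRight_one n, Nat.land_bit, Nat.ldiff_bit]
    cases a <;> cases (decide (n % 2 = 1)) <;>
      simp only [Nat.bit, Bool.and_true, Bool.and_false, Bool.not_true, Bool.not_false,
        Bool.cond_true, Bool.cond_false] <;> have := ih (n >>> 1) <;> omega

theorem pv_ldiff_eq_sub (m n : Nat) : Nat.ldiff m n = m - (m &&& n) := by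
  have := pv_and_add_ldiff m n; omega

-- PySem's Python-exact band/bxor agree with Mathlib's Int.land / Int.xor
theorem pv_band_eq_land (a b : Int) : PySem.Int.band a b = Int.land a b := by
  cases a with
  | ofNat m =>
    cases b with
    | ofNat n => simp [PySem.Int.band, Int.land]
    | negSucc n =>
      simp [PySem.Int.band, Int.land, pv_ldiff_eq_sub, Int.negSucc_eq]
      omega
  | negSucc m =>
    cases b with
    | ofNat n =>
      simp [PySem.Int.band, Int.land, pv_ldiff_eq_sub, Int.negSucc_eq]
      omega
    | negSucc n =>
      simp [PySem.Int.band, Int.land, Int.negSucc_eq]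
      omega

theorem pv_bxor_eq_lxor (a b : Int) : PySem.Int.bxor a b = Int.xor a b := by
  cases a with
  | ofNat m =>
    cases b with
    | ofNat n => simp [PySem.Int.bxor, Int.xor]
    | negSucc n =>
      simp [PySem.Int.bxor, Int.xor, Int.negSucc_eq]
      omega
  | negSucc m =>
    cases b with
    | ofNat n =>
      simp [PySem.Int.bxor, Int.xor, Int.negSucc_eq]
      omega
    | negSucc n =>
      simp [PySem.Int.bxor, Int.xor, Int.negSucc_eq]
      omega

-- doubling recurrences
theorem pv_band_ee (a b : Int) : PySem.Int.band (2*a) (2*b) = 2 * PySem.Int.band a b := by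
  rw [pv_band_eq_land, pv_band_eq_land]
  have h1 : (2*a) = Int.bit false a := by simp [Int.bit_val]
  have h2 : (2*b) = Int.bit false b := by simp [Int.bit_val]
  rw [h1, h2, Int.land_bit]; simp [Int.bit_val]

theorem pv_band_eo (a b : Int) : PySem.Int.band (2*a) (2*b+1) = 2 * PySem.Int.band a b := by
  rw [pv_band_eq_land, pv_band_eq_land]
  have h1 : (2*a) = Int.bit false a := by simp [Int.bit_val]
  have h2 : (2*b+1) = Int.bit true b := by simp [Int.bit_val]
  rw [h1, h2, Int.land_bit]; simp [Int.bit_val]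

theorem pv_band_oe (a b : Int) : PySem.Int.band (2*a+1) (2*b) = 2 * PySem.Int.band a b := by
  rw [pv_band_eq_land, pv_band_eq_land]
  have h1 : (2*a+1) = Int.bit true a := by simp [Int.bit_val]
  have h2 : (2*b) = Int.bit false b := by simp [Int.bit_val]
  rw [h1, h2, Int.land_bit]; simp [Int.bit_val]

theorem pv_band_oo (a b : Int) : PySem.Int.band (2*a+1) (2*b+1) = 2 * PySem.Int.band a b + 1 := by
  rw [pv_band_eq_land, pv_band_eq_land]
  have h1 : (2*a+1) = Int.bit true a := by simp [Int.bit_val]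
  have h2 : (2*b+1) = Int.bit true b := by simp [Int.bit_val]
  rw [h1, h2, Int.land_bit]; simp [Int.bit_val]

theorem pv_bxor_ee (a b : Int) : PySem.Int.bxor (2*a) (2*b) = 2 * PySem.Int.bxor a b := by
  rw [pv_bxor_eq_lxor, pv_bxor_eq_lxor]
  have h1 : (2*a) = Int.bit false a := by simp [Int.bit_val]
  have h2 : (2*b) = Int.bit false b := by simp [Int.bit_val]
  rw [h1, h2, Int.lxor_bit]; simp [Int.bit_val]

theorem pv_bxor_oo (a b : Int) : PySem.Int.bxor (2*a+1) (2*b+1) = 2 * PySem.Int.bxor a b := by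
  rw [pv_bxor_eq_lxor, pv_bxor_eq_lxor]
  have h1 : (2*a+1) = Int.bit true a := by simp [Int.bit_val]
  have h2 : (2*b+1) = Int.bit true b := by simp [Int.bit_val]
  rw [h1, h2, Int.lxor_bit]; simp [Int.bit_val]

-- Python's 1 << i, as elaborated in the port (a Nat shift cast to Int), is 2^i
theorem pv_one_shl (i : Nat) : ((1 <<< i : Nat) : Int) = (2:Int)^i := by
  rw [Nat.shiftLeft_eq]; push_cast; ring

-- bits of m·2^(i+d+1) below the factor 2^(i+d+1) are zero
theorem pv_band_pow_lt (i : Nat) : ∀ (m : Int) (d : Nat),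
    PySem.Int.band (m * 2^(i+d+1)) ((2:Int)^i) = 0 := by
  induction i with
  | zero =>
    intro m d
    have h : m * 2^(0+d+1) = 2 * (m * 2^d) := by ring
    have h2 : ((2:Int)^0) = 2*0+1 := by norm_num
    rw [h, h2, pv_band_eo]
    simp
  | succ i ih =>
    intro m d
    have h : m * 2^(i+1+d+1) = 2 * (m * 2^(i+d+1)) := by ring
    have h2 : ((2:Int)^(i+1)) = 2 * 2^i := by ring
    rw [h, h2, pv_band_ee, ih m d]
    simp

-- the factor bit itself is set
theorem pv_band_pow_self (k : Nat) : ∀ (a : Int),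
    PySem.Int.band ((2*a+1) * 2^k) ((2:Int)^k) = (2:Int)^k := by
  induction k with
  | zero =>
    intro a
    simp only [pow_zero, mul_one]
    have h := pv_band_oo a 0
    simpa using h
  | succ k ih =>
    intro a
    have h : (2*a+1) * 2^(k+1) = 2 * ((2*a+1) * 2^k) := by ring
    have h2 : ((2:Int)^(k+1)) = 2 * 2^k := by ring
    rw [h, h2, pv_band_ee, ih a]

-- the key identity: clearing the lowest set bit via xor equals n & (n-1)
theorem pv_key (k : Nat) : ∀ (a : Int),
    PySem.Int.bxor ((2*a+1) * 2^k) ((2:Int)^k)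
      = PySem.Int.band ((2*a+1) * 2^k) ((2*a+1) * 2^k - 1) := by
  induction k with
  | zero =>
    intro a
    simp only [pow_zero, mul_one]
    have hx := pv_bxor_oo a 0
    have hb := pv_band_oe a a
    rw [PySem.Int.band_self] at hb
    have h1 : (2*a+1 : Int) - 1 = 2*a := by ring
    rw [h1, hb]
    simpa using hx
  | succ k ih =>
    intro a
    have hA : (2*a+1) * 2^(k+1) = 2 * ((2*a+1) * 2^k) := by ring
    have h2 : ((2:Int)^(k+1)) = 2 * 2^k := by ring
    have h3 : (2*a+1) * 2^(k+1) - 1 = 2 * ((2*a+1) * 2^k - 1) + 1 := by ring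
    rw [h3, hA, h2, pv_bxor_ee, pv_band_eo, ih a]

-- every nonzero integer is odd · 2^k
theorem pv_decomp (n : Int) (hn : n ≠ 0) : ∃ (a : Int) (k : Nat), n = (2*a+1) * 2^k := by
  generalize hN : n.natAbs = N
  induction N using Nat.strong_induction_on generalizing n with
  | _ N ih =>
    rcases Int.even_or_odd n with he | ho
    · obtain ⟨c, hc⟩ := he
      have hc2 : n = 2 * c := by omega
      have hc0 : c ≠ 0 := by rintro rfl; simp [hc2] at hn
      have hlt : c.natAbs < N := by
        subst hN; rw [hc2]; simp [Int.natAbs_mul]; omega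
      obtain ⟨a, k, hk⟩ := ih c.natAbs hlt c hc0 rfl
      exact ⟨a, k+1, by rw [hc2, hk]; ring⟩
    · obtain ⟨c, hc⟩ := ho
      exact ⟨c, 0, by rw [hc]; ring⟩

-- the scanning loop reaches the lowest set bit
theorem pv_loop (j : Nat) : ∀ (i : Nat) (a : Int) (fuel : Nat), j + 1 ≤ fuel →
    unsetBitGo ((2*a+1) * 2^(i+j)) i fuel
      = some (PySem.Int.bxor ((2*a+1) * 2^(i+j)) (1 <<< (i+j))) := by
  induction j with
  | zero =>
    intro i a fuel hf
    match fuel, hf with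
    | Nat.succ fuel, _ =>
      rw [unsetBitGo]
      have hne : (2*a+1) * 2^(i+0) ≠ 0 := by
        simp only [Nat.add_zero]
        intro h
        rcases mul_eq_zero.mp h with h1 | h2
        · omega
        · exact (pow_ne_zero i (by norm_num : (2:Int) ≠ 0)) h2
      rw [if_neg hne]
      have hset : PySem.Int.band ((2*a+1) * 2^(i+0)) (1 <<< i) ≠ 0 := by
        rw [pv_one_shl, Nat.add_zero, pv_band_pow_self i a]
        exact pow_ne_zero i (by norm_num)
      simp only [Nat.add_zero] at hset ⊢
      rw [if_pos hset]
  | succ j ih =>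
    intro i a fuel hf
    match fuel, hf with
    | Nat.succ fuel, hf =>
      rw [unsetBitGo]
      have hne : (2*a+1) * 2^(i+(j+1)) ≠ 0 := by
        intro h
        rcases mul_eq_zero.mp h with h1 | h2
        · omega
        · exact (pow_ne_zero _ (by norm_num : (2:Int) ≠ 0)) h2
      rw [if_neg hne]
      have hclear : ¬ PySem.Int.band ((2*a+1) * 2^(i+(j+1))) (1 <<< i) ≠ 0 := by
        rw [pv_one_shl]
        have h : i + (j+1) = i + j + 1 := by omega
        rw [h, pv_band_pow_lt i (2*a+1) j]
        simp
      rw [if_neg hclear]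
      have h1 : i + (j+1) = (i+1) + j := by omega
      rw [h1]
      exact ih (i+1) a fuel (by omega)

-- fuel n.natAbs + 1 suffices: k < natAbs n
theorem pv_fuel (a : Int) (k : Nat) : k + 1 ≤ ((2*a+1) * 2^k).natAbs + 1 := by
  have h1 : ((2*a+1) * 2^k).natAbs = (2*a+1).natAbs * 2^k := by
    simp [Int.natAbs_mul, Int.natAbs_pow]
  have h2 : (2*a+1).natAbs ≥ 1 := by omega
  have h3 : k < 2^k := Nat.lt_two_pow_self
  have : 2^k ≤ (2*a+1).natAbs * 2^k := Nat.le_mul_of_pos_left _ (by omega)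
  omega

-- ===== VERDICT (by name: the statement is the Claim_ definition above) =====
theorem unsetBit_spec : Claim_equal_unsetBit := by
  unfold Claim_equal_unsetBit
  intro n _
  unfold Spec_unsetBit unsetBit unsetBit_alt
  by_cases hn : n = 0
  · subst hn; rfl
  · obtain ⟨a, k, hk⟩ := pv_decomp n hn
    rw [if_neg hn, hk]
    have hloop := pv_loop k 0 a (((2*a+1) * 2^k).natAbs + 1)
      (by simpa using pv_fuel a k)
    simp only [Nat.zero_add] at hloop
    rw [hloop, pv_one_shl, pv_key k a]
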